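-- pv_equiv track=rewrite | github.com/chasehult/aoc-2023 | day12.py | works
-- ===== SOURCE A (Python) =====
-- def works(row, cnts):
--     cnts = cnts[:]
--     cnt = 0
--     try:
--         for c in row:
--             if c == '#':
--                 cnt += 1
--             elif c == '.':
--                 if cnt == 0:
--                     continue
--                 if cnt != cnts.pop(0):
--                     return False
--                 cnt = 0
--         if cnt == 0:
--             return not len(cnts)
--         return cnt == cnts.pop(0) and len(cnts) == 0
--     except IndexError:
--         return False
-- ===== SOURCE B (Python) =====
-- def works(row, cnts):
--     s = ''.join(c for c in row if c in '#.')
--     runs = [len(g) for g in s.split('.') if g]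
--     return runs == cnts
-- ===== Notes on version B (the rewrite author's own statement) =====
-- stated objective: simpler
-- what changed: B replaces A's streaming compare (mutable cnt, cnts.pop(0), early returns, try/except IndexError) by building the whole run-length table once (filter to '#'/'.', split on '.', take group lengths) and comparing it to cnts by list equality.
import Mathlib
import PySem

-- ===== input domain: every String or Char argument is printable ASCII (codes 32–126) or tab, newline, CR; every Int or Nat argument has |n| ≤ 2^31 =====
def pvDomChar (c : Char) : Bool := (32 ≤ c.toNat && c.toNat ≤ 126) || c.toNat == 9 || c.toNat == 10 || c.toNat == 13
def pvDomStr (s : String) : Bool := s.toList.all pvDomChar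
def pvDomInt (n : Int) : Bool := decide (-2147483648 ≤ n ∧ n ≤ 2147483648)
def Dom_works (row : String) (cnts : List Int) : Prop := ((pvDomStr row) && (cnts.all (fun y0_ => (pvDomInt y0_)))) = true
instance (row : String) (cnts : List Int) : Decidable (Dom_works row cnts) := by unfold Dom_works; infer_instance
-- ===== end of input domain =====

-- B builds the whole run-length table (filter to '#'/'.', split on '.') and compares it to cnts by
-- list equality, instead of A's streaming compare with pop(0)/early return/try-except. Objective: simpler.

-- ===== PORT A =====
-- the for-loop over row's characters, with state (remaining cnts, current run cnt);
-- cnts.pop(0) on an empty list raises IndexError, caught by A's except → return False,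
-- so the `none` branch of PySem.List.pop? returns false.
def worksLoop (cs : List Char) (cnts : List Int) (cnt : Int) : Bool :=
  match cs with
  | [] =>
    if cnt == 0 then cnts.isEmpty
    else
      match PySem.List.pop? cnts 0 with
      | none => false                                    -- IndexError → except → False
      | some (x, rest) => cnt == x && rest.length == 0
  | c :: rest =>
    if c == '#' then worksLoop rest cnts (cnt + 1)
    else if c == '.' then
      if cnt == 0 then worksLoop rest cnts 0             -- continue
      else
        match PySem.List.pop? cnts 0 with
        | none => false                                  -- IndexError → except → False
        | some (x, xs) =>
          if cnt != x then false                         -- return False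
          else worksLoop rest xs 0
    else worksLoop rest cnts cnt

def works (row : String) (cnts : List Int) : Bool :=
  worksLoop row.toList cnts 0

-- ===== PORT B =====
def works_alt (row : String) (cnts : List Int) : Bool :=
  let s := row.toList.filter (fun c => c == '#' || c == '.')
  let runs := ((PySem.Chars.splitOn s ['.']).filter (fun g => !g.isEmpty)).map
      (fun g => (g.length : Int))
  runs == cnts

-- ===== PRECONDITION & SPEC =====
def Spec_works (row : String) (cnts : List Int) (out : Bool) : Prop := out = works_alt row cnts
instance (row : String) (cnts : List Int) (out : Bool) : Decidable (Spec_works row cnts out) := by unfold Spec_works; infer_instance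

-- ===== CLAIM (what is proved, stated in full; the proofs are below) =====
def Claim_equal_works : Prop := ∀ (row : String) (cnts : List Int), Dom_works row cnts → Spec_works row cnts (works row cnts)

-- ===== LEMMAS AND PROOFS =====

-- run-length table of cs given a current open run of length cnt (intermediate notion for the proof)
def runsAux (cs : List Char) (cnt : Int) : List Int :=
  match cs with
  | [] => if cnt == 0 then [] else [cnt]
  | c :: rest =>
    if c == '#' then runsAux rest (cnt + 1)
    else if c == '.' then
      if cnt == 0 then runsAux rest 0 else cnt :: runsAux rest 0
    else runsAux rest cnt

-- structural version of split-on-'.' with the current (reversed) group as accumulator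
def mySplit (cs : List Char) (cur : List Char) : List (List Char) :=
  match cs with
  | [] => [cur.reverse]
  | c :: rest =>
    if c == '.' then cur.reverse :: mySplit rest []
    else mySplit rest (c :: cur)

lemma worksLoop_eq_runsAux (cs : List Char) (cnts : List Int) (cnt : Int) :
    worksLoop cs cnts cnt = decide (runsAux cs cnt = cnts) := by
  induction cs generalizing cnts cnt with
  | nil =>
    simp only [worksLoop, runsAux]
    by_cases h : cnt = 0
    · simp [h]
      cases cnts <;> simp
    · simp [h]
      cases cnts with
      | nil => simp [PySem.List.pop?, PySem.List.pyIdx?]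
      | cons x xs =>
        simp [PySem.List.pop?_zero_cons]
        by_cases hx : cnt = x
        · subst hx; cases xs <;> simp
        · simp [hx]
  | cons c rest ih =>
    simp only [worksLoop, runsAux]
    by_cases hh : c = '#'
    · simp [hh, ih]
    · by_cases hd : c = '.'
      · simp [hd]
        by_cases h0 : cnt = 0
        · simp [h0, ih]
        · simp [h0]
          cases cnts with
          | nil => simp [PySem.List.pop?, PySem.List.pyIdx?]
          | cons x xs =>
            simp only [PySem.List.pop?_zero_cons, ih]
            by_cases hx : cnt = x
            · simp [hx]
            · simp [hx]
      · simp [hh, hd, ih]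

lemma runsAux_filter (cs : List Char) (cnt : Int) :
    runsAux (cs.filter (fun c => c == '#' || c == '.')) cnt = runsAux cs cnt := by
  induction cs generalizing cnt with
  | nil => rfl
  | cons c rest ih =>
    by_cases hh : c = '#'
    · simp [hh, runsAux, ih]
    · by_cases hd : c = '.'
      · simp [List.filter_cons, hh, hd, runsAux, ih]
      · simp [List.filter_cons, hh, hd, runsAux, ih]

lemma splitOn_go_eq_mySplit (fuel : Nat) (l cur : List Char) (acc : List (List Char))
    (h : l.length < fuel) :
    PySem.Chars.splitOn.go ['.'] fuel l cur acc = acc.reverse ++ mySplit l cur := by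
  induction fuel generalizing l cur acc with
  | zero => omega
  | succ fuel ih =>
    cases l with
    | nil => simp [PySem.Chars.splitOn.go, mySplit]
    | cons c rest =>
      simp only [PySem.Chars.splitOn.go]
      by_cases hc : c = '.'
      · subst hc
        have hp : List.isPrefixOf ['.'] ('.' :: rest) = true := by
          simp [List.isPrefixOf]
        simp only [hp, if_pos]
        rw [ih _ _ _ (by simpa using Nat.lt_of_succ_lt_succ h)]
        simp [mySplit]
      · have hp : List.isPrefixOf ['.'] (c :: rest) = false := by
          simp [List.isPrefixOf]
          exact fun e => hc e.symm
        simp only [hp, Bool.false_eq_true, if_false]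
        rw [ih _ _ _ (by simpa using Nat.lt_of_succ_lt_succ h)]
        simp [mySplit, hc]

lemma splitOn_eq_mySplit (s : List Char) :
    PySem.Chars.splitOn s ['.'] = mySplit s [] := by
  unfold PySem.Chars.splitOn
  rw [splitOn_go_eq_mySplit _ _ _ _ (by omega)]
  simp

lemma mySplit_runs (cs cur : List Char) (h : ∀ c ∈ cs, c = '#' ∨ c = '.') :
    ((mySplit cs cur).filter (fun g => !g.isEmpty)).map (fun g => (g.length : Int))
      = runsAux cs (cur.length : Int) := by
  induction cs generalizing cur with
  | nil =>
    simp only [mySplit, runsAux]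
    cases cur with
    | nil => simp
    | cons a as =>
      simp
      omega
  | cons c rest ih =>
    have hrest : ∀ c ∈ rest, c = '#' ∨ c = '.' := fun x hx => h x (List.mem_cons_of_mem _ hx)
    rcases h c (List.mem_cons_self) with hc | hc
    · subst hc
      have h2 := ih ('#' :: cur) hrest
      simp only [List.length_cons] at h2
      push_cast at h2
      simp [mySplit, runsAux, h2]
    · subst hc
      simp only [mySplit, runsAux]
      by_cases h0 : cur = []
      · subst h0
        simpa using ih [] hrest
      · have hne : (cur.reverse.isEmpty) = false := by
          simp [h0]
        have hlen : ¬ ((cur.length : Int) = 0) := by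
          have : cur.length ≠ 0 := by simpa [List.length_eq_zero_iff] using h0
          exact_mod_cast this
        simp [hne, hlen, h0, List.filter_cons, ih [] hrest]

-- ===== VERDICT (by name: the statement is the Claim_ definition above) =====
theorem works_spec : Claim_equal_works := by
  intro row cnts _
  unfold Spec_works works works_alt
  rw [worksLoop_eq_runsAux]
  simp only [splitOn_eq_mySplit]
  have hm := mySplit_runs (row.toList.filter (fun c => c == '#' || c == '.')) []
    (by intro c hc; simpa using (List.of_mem_filter hc))
  simp only [List.length_nil, Int.ofNat_zero] at hm
  simp only [hm, runsAux_filter]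
  exact (Bool.beq_eq_decide_eq _ _).symm
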